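-- pv_equiv track=rewrite | github.com/batkins33/DocTR_Process | post_ocr_corrections.py | apply_confusion_map
-- ===== SOURCE A (Python) =====
-- CONFUSION_PAIRS = [
--     ("O", "0"),
--     ("I", "1"),
--     ("l", "1"),
--     ("S", "5"),
--     ("B", "8"),
--     ("Z", "2"),
--     ("G", "6"),
--     ("Q", "0"),
--     ("D", "0"),
-- ]
--
-- def apply_confusion_map(text: str, allowed_chars: str | None = None) -> str:
--     t = list(text)
--     for i, ch in enumerate(t):
--         for a, b in CONFUSION_PAIRS:
--             if ch == a:
--                 candidate = b
--             elif ch == b: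
--                 candidate = a
--             else:
--                 continue
--             if allowed_chars and candidate not in allowed_chars:
--                 continue
--             # Replace only if it improves "alnum-ness" (simple heuristic)
--             if (
--                 candidate.isdigit() != ch.isdigit()
--                 or candidate.isalpha() != ch.isalpha()
--             ):
--                 t[i] = candidate
--     return "".join(t)
-- ===== SOURCE B (Python) =====
-- CONFUSION_PAIRS = [
--     ("O", "0"),
--     ("I", "1"),
--     ("l", "1"),
--     ("S", "5"),
--     ("B", "8"),
--     ("Z", "2"),
--     ("G", "6"),
--     ("Q", "0"),
--     ("D", "0"),
-- ]
--
-- # Precomputed table: each char -> ordered list of its swap candidates.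
-- CONFUSION_MAP = {}
-- for _a, _b in CONFUSION_PAIRS:
--     CONFUSION_MAP.setdefault(_a, []).append(_b)
--     CONFUSION_MAP.setdefault(_b, []).append(_a)
--
--
-- def apply_confusion_map(text: str, allowed_chars: str | None = None) -> str:
--     def pick(ch):
--         # last passing candidate wins == first passing one of the reversed list
--         return next(
--             (c for c in reversed(CONFUSION_MAP.get(ch, []))
--              if (not allowed_chars or c in allowed_chars)
--              and (c.isdigit() != ch.isdigit() or c.isalpha() != ch.isalpha())),
--             ch,
--         )
--     return "".join(pick(ch) for ch in text)
-- ===== Notes on version B (the rewrite author's own statement) =====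
-- stated objective: idiomatic
-- what changed: Replaces A's per-character scan over all CONFUSION_PAIRS (mutating the list in place, last matching pair wins) with a precomputed candidate table built once from the pairs plus a single lookup-driven pass that picks the first passing candidate of the reversed candidate list.
import Mathlib
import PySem

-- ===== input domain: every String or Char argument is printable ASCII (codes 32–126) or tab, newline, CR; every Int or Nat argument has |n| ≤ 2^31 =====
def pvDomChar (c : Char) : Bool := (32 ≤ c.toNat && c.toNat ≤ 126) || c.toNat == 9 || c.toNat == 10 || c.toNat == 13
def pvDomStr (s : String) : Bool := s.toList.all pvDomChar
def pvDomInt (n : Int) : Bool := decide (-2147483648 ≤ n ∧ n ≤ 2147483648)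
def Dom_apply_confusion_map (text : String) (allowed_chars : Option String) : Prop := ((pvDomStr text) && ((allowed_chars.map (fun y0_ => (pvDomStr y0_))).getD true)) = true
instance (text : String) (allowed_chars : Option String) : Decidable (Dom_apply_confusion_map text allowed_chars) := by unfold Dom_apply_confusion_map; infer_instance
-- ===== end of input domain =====

-- B replaces A's nested char×pairs scan by a precomputed candidate table plus one
-- lookup-driven pass (idiomatic/alternative; not claimed faster).

-- ===== PORT A =====
def confusionPairs : List (Char × Char) :=
  [('O','0'),('I','1'),('l','1'),('S','5'),('B','8'),('Z','2'),('G','6'),('Q','0'),('D','0')]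

-- 'allowed_chars and candidate not in allowed_chars': None or "" disable the filter;
-- candidate is a single char, so 'candidate in allowed_chars' is char membership (exact).
def allowedOk (allowed : Option String) (c : Char) : Bool :=
  match allowed with
  | none => true
  | some s => s.toList.isEmpty || s.toList.contains c

def improves (ch c : Char) : Bool :=
  (PySem.Chars.isdigit c != PySem.Chars.isdigit ch) || (PySem.Chars.isalpha c != PySem.Chars.isalpha ch)

-- literal transliteration of A: for each char, scan all pairs, overwrite with the
-- last candidate that passes the filter and the alnum heuristic (ch stays the original).
def apply_confusion_map (text : String) (allowed_chars : Option String) : String :=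
  String.mk (text.toList.map (fun ch =>
    confusionPairs.foldl (fun cur p =>
      if ch == p.1 then
        (if allowedOk allowed_chars p.2 && improves ch p.2 then p.2 else cur)
      else if ch == p.2 then
        (if allowedOk allowed_chars p.1 && improves ch p.1 then p.1 else cur)
      else cur) ch))

-- ===== PORT B =====
-- module-level table CONFUSION_MAP (dict built with setdefault/append)
def confusionMap : PySem.Dict Char (List Char) :=
  confusionPairs.foldl (fun d p =>
    let d' := d.insert p.1 ((d.getD p.1 []) ++ [p.2])
    d'.insert p.2 ((d'.getD p.2 []) ++ [p.1])) PySem.Dict.empty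

def apply_confusion_map_alt (text : String) (allowed_chars : Option String) : String :=
  String.mk (text.toList.map (fun ch =>
    (((confusionMap.getD ch []).reverse.find? (fun c =>
        allowedOk allowed_chars c && improves ch c)).getD ch)))

-- ===== PRECONDITION & SPEC =====
def Spec_apply_confusion_map (text : String) (allowed_chars : Option String) (out : String) : Prop := out = apply_confusion_map_alt text allowed_chars
instance (text : String) (allowed_chars : Option String) (out : String) : Decidable (Spec_apply_confusion_map text allowed_chars out) := by unfold Spec_apply_confusion_map; infer_instance

-- ===== CLAIM (what is proved, stated in full; the proofs are below) =====
def Claim_equal_apply_confusion_map : Prop := ∀ (text : String) (allowed_chars : Option String), Dom_apply_confusion_map text allowed_chars → Spec_apply_confusion_map text allowed_chars (apply_confusion_map text allowed_chars)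

-- ===== LEMMAS AND PROOFS =====

-- ordered candidate list of ch as read directly off the pairs
def candList (pairs : List (Char × Char)) (ch : Char) : List Char :=
  pairs.foldr (fun p acc =>
    if ch == p.1 then p.2 :: acc else if ch == p.2 then p.1 :: acc else acc) []

-- last passing element of a fold = first passing element of the reversed list
theorem foldl_pick (q : Char → Bool) (l : List Char) (init : Char) :
    l.foldl (fun cur c => if q c then c else cur) init
      = ((l.reverse.find? q).getD init) := by
  induction l generalizing init with
  | nil => simp
  | cons c tl ih =>
    simp only [List.foldl_cons, List.reverse_cons, List.find?_append, ih]
    cases h : tl.reverse.find? q with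
    | some x => simp [Option.or]
    | none => cases hq : q c <;> simp [Option.or, hq]

-- A's scan over the pairs is the last-wins fold over the candidate list
theorem foldA_eq_candList (q : Char → Bool) (pairs : List (Char × Char)) (ch init : Char) :
    pairs.foldl (fun cur p =>
      if ch == p.1 then (if q p.2 then p.2 else cur)
      else if ch == p.2 then (if q p.1 then p.1 else cur)
      else cur) init
    = (candList pairs ch).foldl (fun cur c => if q c then c else cur) init := by
  induction pairs generalizing init with
  | nil => rfl
  | cons p tl ih =>
    simp only [List.foldl_cons, candList, List.foldr_cons]
    by_cases h1 : ch == p.1 <;> by_cases h2 : ch == p.2 <;>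
      simp [h1, h2, candList] at ih ⊢ <;> rw [ih]

-- the table lookup coincides with the direct candidate list
theorem mapGet_eq_candList (ch : Char) :
    confusionMap.getD ch [] = candList confusionPairs ch := by
  by_cases h1 : ch = 'O'; · subst h1; decide
  by_cases h2 : ch = '0'; · subst h2; decide
  by_cases h3 : ch = 'I'; · subst h3; decide
  by_cases h4 : ch = '1'; · subst h4; decide
  by_cases h5 : ch = 'l'; · subst h5; decide
  by_cases h6 : ch = 'S'; · subst h6; decide
  by_cases h7 : ch = '5'; · subst h7; decide
  by_cases h8 : ch = 'B'; · subst h8; decide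
  by_cases h9 : ch = '8'; · subst h9; decide
  by_cases h10 : ch = 'Z'; · subst h10; decide
  by_cases h11 : ch = '2'; · subst h11; decide
  by_cases h12 : ch = 'G'; · subst h12; decide
  by_cases h13 : ch = '6'; · subst h13; decide
  by_cases h14 : ch = 'Q'; · subst h14; decide
  by_cases h15 : ch = 'D'; · subst h15; decide
  have g : ∀ a : Char, ¬ ch = a → (a == ch) = false :=
    fun a h => beq_eq_false_iff_ne.mpr (Ne.symm h)
  simp [confusionMap, confusionPairs, candList, PySem.Dict.getD, PySem.Dict.get?,
        PySem.Dict.insert, PySem.Dict.empty, h1, h2, h3, h4, h5, h6, h7, h8, h9,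
        h10, h11, h12, h13, h14, h15, g _ h1, g _ h2, g _ h3, g _ h4, g _ h5,
        g _ h6, g _ h7, g _ h8, g _ h9, g _ h10, g _ h11, g _ h12, g _ h13,
        g _ h14, g _ h15]

theorem perChar (allowed : Option String) (ch : Char) :
    confusionPairs.foldl (fun cur p =>
      if ch == p.1 then
        (if allowedOk allowed p.2 && improves ch p.2 then p.2 else cur)
      else if ch == p.2 then
        (if allowedOk allowed p.1 && improves ch p.1 then p.1 else cur)
      else cur) ch
    = (((confusionMap.getD ch []).reverse.find? (fun c =>
        allowedOk allowed c && improves ch c)).getD ch) := by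
  rw [foldA_eq_candList (fun c => allowedOk allowed c && improves ch c),
      foldl_pick, mapGet_eq_candList]

-- ===== VERDICT (by name: the statement is the Claim_ definition above) =====
theorem apply_confusion_map_spec : Claim_equal_apply_confusion_map := by
  intro text allowed _
  unfold Spec_apply_confusion_map apply_confusion_map apply_confusion_map_alt
  exact congrArg String.mk (List.map_congr_left (fun ch _ => perChar allowed ch))
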